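-- pv_equiv track=rewrite | github.com/IsraPKMNPAP/tesis_repo | dataset_bicicletas/utils/features.py | apply_feature_diff
-- ===== SOURCE A (Python) =====
-- from typing import Iterable, List, Sequence
--
-- def apply_feature_diff(
--     all_cols: Sequence[str],
--     base: Sequence[str] | None = None,
--     add: Sequence[str] | None = None,
--     remove: Sequence[str] | None = None,
-- ) -> List[str]:
--     """Start from `base` (or `all_cols` if None), add and/or remove features.
--
--     Preserves the original order from `all_cols` in the final list.
--     Unknown features (not in `all_cols`) are ignored.
--     """
--     all_set = set(all_cols)
--     selected = set(base) if base is not None else set(all_cols)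
--     if add:
--         selected |= {f for f in add if f in all_set}
--     if remove:
--         selected -= {f for f in remove if f in all_set}
--     return [f for f in all_cols if f in selected]
-- ===== SOURCE B (Python) =====
-- def apply_feature_diff(all_cols, base=None, add=None, remove=None):
--     """Positional algorithm: build an occurrence index (column -> list of
--     positions in all_cols), compute the set of SELECTED POSITIONS by set
--     operations on indices, then emit the columns at the sorted positions.
--     Correct because every occurrence of a name shares one membership fate,
--     and sorted positions reproduce all_cols' order."""
--     occ = {}
--     for i, f in enumerate(all_cols):
--         occ.setdefault(f, []).append(i)
--     if base is None:
--         picked = set(range(len(all_cols)))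
--     else:
--         picked = set()
--         for f in set(base):
--             picked.update(occ.get(f, ()))
--     if add:
--         for f in set(add):
--             picked.update(occ.get(f, ()))
--     if remove:
--         for f in set(remove):
--             picked.difference_update(occ.get(f, ()))
--     return [all_cols[i] for i in sorted(picked)]
-- ===== Notes on version B (the rewrite author's own statement) =====
-- stated objective: alternative
-- what changed: A does set algebra on column NAMES (base set, union add, minus remove) and then filters all_cols by membership; B works on POSITIONS instead: it builds an occurrence index (column name -> list of positions in all_cols), computes the selected position set by updating/differencing with those position lists, and emits the columns at the sorted selected positions.
import Mathlib
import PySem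

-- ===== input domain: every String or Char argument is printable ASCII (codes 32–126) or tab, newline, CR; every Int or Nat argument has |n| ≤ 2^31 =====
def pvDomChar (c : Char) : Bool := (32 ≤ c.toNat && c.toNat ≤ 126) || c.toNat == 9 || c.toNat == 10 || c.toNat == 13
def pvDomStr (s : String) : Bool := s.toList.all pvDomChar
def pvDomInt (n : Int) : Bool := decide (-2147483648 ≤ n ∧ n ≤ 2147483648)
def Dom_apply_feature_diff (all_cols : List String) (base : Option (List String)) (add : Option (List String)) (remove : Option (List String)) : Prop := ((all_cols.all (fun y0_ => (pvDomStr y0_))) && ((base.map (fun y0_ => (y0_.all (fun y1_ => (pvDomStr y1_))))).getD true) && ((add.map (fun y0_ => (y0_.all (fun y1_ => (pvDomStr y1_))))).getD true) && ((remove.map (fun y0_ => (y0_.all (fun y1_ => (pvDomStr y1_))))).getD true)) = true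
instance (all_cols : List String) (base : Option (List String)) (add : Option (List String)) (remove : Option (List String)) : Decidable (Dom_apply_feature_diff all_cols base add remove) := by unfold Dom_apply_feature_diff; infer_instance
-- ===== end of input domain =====

-- B replaces A's name-set algebra + final membership filter by a positional algorithm: an occurrence index (column -> positions), set operations on POSITION sets, and a final sort of the selected positions; objective: alternative (same asymptotic cost).


-- ===== PORT A =====
def apply_feature_diff (all_cols : List String) (base : Option (List String)) (add : Option (List String)) (remove : Option (List String)) : List String :=
  let all_set : PySem.Set String := PySem.Set.ofList all_cols
  let selected : PySem.Set String :=
    match base with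
    | some b => PySem.Set.ofList b
    | none   => PySem.Set.ofList all_cols
  let selected :=
    match add with
    | some a => if a ≠ [] then PySem.Set.union selected (PySem.Set.ofList (a.filter (fun f => PySem.Set.contains all_set f))) else selected
    | none   => selected
  let selected :=
    match remove with
    | some r => if r ≠ [] then PySem.Set.diff selected (PySem.Set.ofList (r.filter (fun f => PySem.Set.contains all_set f))) else selected
    | none   => selected
  all_cols.filter (fun f => PySem.Set.contains selected f)

-- ===== PORT B =====
-- occ = {}; for i, f in enumerate(all_cols): occ.setdefault(f, []).append(i)
def pvOcc (all_cols : List String) : PySem.Dict String (List Int) :=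
  (PySem.List.enumerate all_cols 0).foldl (fun d p => d.modify p.2 [] (· ++ [p.1])) PySem.Dict.empty

-- for f in set(l): picked.update(occ.get(f, ()))  (iteration over the set is order-independent: it only builds another set)
def pvUpdateLoop (occ : PySem.Dict String (List Int)) (l : List String) (s : PySem.Set Int) : PySem.Set Int :=
  l.foldl (fun s f => PySem.Set.update s (occ.getD f [])) s

-- for f in set(l): picked.difference_update(occ.get(f, ()))  (order-independent likewise)
def pvDiffLoop (occ : PySem.Dict String (List Int)) (l : List String) (s : PySem.Set Int) : PySem.Set Int :=
  l.foldl (fun s f => PySem.Set.diff s (occ.getD f [])) s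

def apply_feature_diff_alt (all_cols : List String) (base : Option (List String)) (add : Option (List String)) (remove : Option (List String)) : List String :=
  let occ := pvOcc all_cols
  let picked : PySem.Set Int :=
    match base with
    | none   => PySem.Set.ofList (PySem.List.pyRange 0 (all_cols.length : Int) 1)
    | some b => pvUpdateLoop occ (PySem.Set.ofList b) PySem.Set.empty
  let picked :=
    match add with
    | some a => if a ≠ [] then pvUpdateLoop occ (PySem.Set.ofList a) picked else picked
    | none   => picked
  let picked :=
    match remove with
    | some r => if r ≠ [] then pvDiffLoop occ (PySem.Set.ofList r) picked else picked
    | none   => picked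
  (PySem.List.sorted picked (fun x => x) false).map (fun i => PySem.List.pyGetD all_cols i "")

-- ===== PRECONDITION & SPEC =====
def Spec_apply_feature_diff (all_cols : List String) (base : Option (List String)) (add : Option (List String)) (remove : Option (List String)) (out : List String) : Prop := out = apply_feature_diff_alt all_cols base add remove
instance (all_cols : List String) (base : Option (List String)) (add : Option (List String)) (remove : Option (List String)) (out : List String) : Decidable (Spec_apply_feature_diff all_cols base add remove out) := by unfold Spec_apply_feature_diff; infer_instance

-- ===== CLAIM (what is proved, stated in full; the proofs are below) =====
def Claim_equal_apply_feature_diff : Prop := ∀ (all_cols : List String) (base : Option (List String)) (add : Option (List String)) (remove : Option (List String)), Dom_apply_feature_diff all_cols base add remove → Spec_apply_feature_diff all_cols base add remove (apply_feature_diff all_cols base add remove)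

-- ===== LEMMAS AND PROOFS =====

-- the column-level selection predicate both programs compute
def pvSel (base add remove : Option (List String)) (f : String) : Bool :=
  ((match base with | none => true | some b => decide (f ∈ b)) ||
   (match add with | some a => decide (a ≠ [] ∧ f ∈ a) | none => false)) &&
  !(match remove with | some r => decide (r ≠ [] ∧ f ∈ r) | none => false)

-- A's result is all_cols filtered by pvSel
theorem pvA_eq_filter (all_cols : List String) (base add remove : Option (List String)) :
    apply_feature_diff all_cols base add remove = all_cols.filter (pvSel base add remove) := by
  unfold apply_feature_diff
  apply List.filter_congr
  intro f hf
  cases base <;> cases add <;> cases remove <;>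
    simp_all [pvSel, PySem.Set.contains_eq_listContains, PySem.Set.mem_ofList] <;>
    split_ifs <;>
    simp_all [PySem.Set.mem_ofList]

-- occ lookups: the positions of f in all_cols
theorem pvOcc_getD (all_cols : List String) (f : String) :
    (pvOcc all_cols).getD f [] =
      ((PySem.List.enumerate all_cols 0).filter (fun p => p.2 == f)).map (·.1) := by
  unfold pvOcc
  have h := List.foldl_map (f := fun p : Int × String => (p.2, p.1))
    (g := fun (d : PySem.Dict String (List Int)) (q : String × Int) => d.modify q.1 [] (· ++ [q.2]))
    (l := PySem.List.enumerate all_cols 0) (init := PySem.Dict.empty)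
  rw [← h, PySem.Dict.getD_foldl_modify_append]
  simp [List.filter_map, Function.comp_def]

theorem pvMem_occ (all_cols : List String) (f : String) (i : Int) :
    i ∈ (pvOcc all_cols).getD f [] ↔
      ∃ (k : Nat) (h : k < all_cols.length), i = (k : Int) ∧ all_cols[k] = f := by
  rw [pvOcc_getD]
  simp only [List.mem_map, List.mem_filter, PySem.List.mem_enumerate_iff]
  constructor
  · rintro ⟨p, ⟨⟨k, hk, rfl⟩, hpf⟩, rfl⟩
    exact ⟨k, hk, by simp, by simpa using hpf⟩
  · rintro ⟨k, hk, rfl, rfl⟩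
    exact ⟨((k : Int), all_cols[k]), ⟨⟨k, hk, by simp⟩, by simp⟩, rfl⟩

theorem pvMem_updateLoop (occ : PySem.Dict String (List Int)) (l : List String) (s : PySem.Set Int) (i : Int) :
    i ∈ pvUpdateLoop occ l s ↔ i ∈ s ∨ ∃ f ∈ l, i ∈ occ.getD f [] := by
  induction l generalizing s with
  | nil => simp [pvUpdateLoop]
  | cons x xs ih =>
    simp only [pvUpdateLoop, List.foldl_cons] at *
    rw [ih]
    simp [PySem.Set.mem_update]
    tauto

theorem pvMem_diffLoop (occ : PySem.Dict String (List Int)) (l : List String) (s : PySem.Set Int) (i : Int) :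
    i ∈ pvDiffLoop occ l s ↔ i ∈ s ∧ ∀ f ∈ l, i ∉ occ.getD f [] := by
  induction l generalizing s with
  | nil => simp [pvDiffLoop]
  | cons x xs ih =>
    simp only [pvDiffLoop, List.foldl_cons] at *
    rw [ih]
    simp [PySem.Set.mem_diff]
    tauto

theorem pvNodup_updateLoop (occ : PySem.Dict String (List Int)) (l : List String) (s : PySem.Set Int) (hs : s.Nodup) :
    (pvUpdateLoop occ l s).Nodup := by
  induction l generalizing s with
  | nil => simp [pvUpdateLoop]; exact hs
  | cons x xs ih =>
    simp only [pvUpdateLoop, List.foldl_cons] at *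
    exact ih _ (PySem.Set.nodup_update _ _ hs)

theorem pvNodup_diffLoop (occ : PySem.Dict String (List Int)) (l : List String) (s : PySem.Set Int) (hs : s.Nodup) :
    (pvDiffLoop occ l s).Nodup := by
  induction l generalizing s with
  | nil => simp [pvDiffLoop]; exact hs
  | cons x xs ih =>
    simp only [pvDiffLoop, List.foldl_cons] at *
    exact ih _ (PySem.Set.nodup_diff _ _ hs)

-- occ lookup, restated without a dependent index proof
theorem pvMem_occ' (all_cols : List String) (f : String) (i : Int) :
    i ∈ (pvOcc all_cols).getD f [] ↔
      0 ≤ i ∧ i < (all_cols.length : Int) ∧ all_cols.getD i.toNat "" = f := by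
  rw [pvMem_occ]
  constructor
  · rintro ⟨k, hk, rfl, rfl⟩
    refine ⟨by omega, by exact_mod_cast hk, ?_⟩
    simp [hk]
  · rintro ⟨h0, hlt, hget⟩
    have hlt' : i.toNat < all_cols.length := by omega
    exact ⟨i.toNat, hlt', by omega, by rw [← List.getD_eq_getElem _ _ hlt']; exact hget⟩

-- the picked-positions set, as the port's body computes it (proof-side copy, equal by rfl)
def pvPicked (all_cols : List String) (base add remove : Option (List String)) : PySem.Set Int :=
  let occ := pvOcc all_cols
  let picked : PySem.Set Int :=
    match base with
    | none   => PySem.Set.ofList (PySem.List.pyRange 0 (all_cols.length : Int) 1)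
    | some b => pvUpdateLoop occ (PySem.Set.ofList b) PySem.Set.empty
  let picked :=
    match add with
    | some a => if a ≠ [] then pvUpdateLoop occ (PySem.Set.ofList a) picked else picked
    | none   => picked
  match remove with
  | some r => if r ≠ [] then pvDiffLoop occ (PySem.Set.ofList r) picked else picked
  | none   => picked

theorem pvAlt_eq_sorted_picked (all_cols : List String) (base add remove : Option (List String)) :
    apply_feature_diff_alt all_cols base add remove =
      (PySem.List.sorted (pvPicked all_cols base add remove) (fun x => x) false).map
        (fun i => PySem.List.pyGetD all_cols i "") := rfl

theorem pvNodup_picked (all_cols : List String) (base add remove : Option (List String)) :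
    (pvPicked all_cols base add remove).Nodup := by
  unfold pvPicked
  have h0 : (match base with
    | none   => PySem.Set.ofList (PySem.List.pyRange 0 (all_cols.length : Int) 1)
    | some b => pvUpdateLoop (pvOcc all_cols) (PySem.Set.ofList b) PySem.Set.empty).Nodup := by
    cases base with
    | none => exact PySem.Set.nodup_ofList _
    | some b => exact pvNodup_updateLoop _ _ _ List.nodup_nil
  cases add <;> cases remove <;> simp only [] <;> (try split_ifs) <;>
    first
      | exact h0
      | exact pvNodup_updateLoop _ _ _ h0
      | exact pvNodup_diffLoop _ _ _ h0
      | exact pvNodup_diffLoop _ _ _ (pvNodup_updateLoop _ _ _ h0)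

-- stage characterizations, in a uniform shape
theorem pvMem_updateOcc (xs : List String) (l : List String) (s : PySem.Set Int) (i : Int) :
    i ∈ pvUpdateLoop (pvOcc xs) l s ↔
      i ∈ s ∨ (0 ≤ i ∧ i < (xs.length : Int) ∧ xs.getD i.toNat "" ∈ l) := by
  rw [pvMem_updateLoop]
  refine or_congr Iff.rfl ?_
  constructor
  · rintro ⟨f, hf, hocc⟩
    obtain ⟨h0, hlt, rfl⟩ := (pvMem_occ' xs f i).mp hocc
    exact ⟨h0, hlt, hf⟩
  · rintro ⟨h0, hlt, hmem⟩
    exact ⟨_, hmem, (pvMem_occ' xs _ i).mpr ⟨h0, hlt, rfl⟩⟩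

theorem pvMem_diffOcc (xs : List String) (l : List String) (s : PySem.Set Int) (i : Int) :
    i ∈ pvDiffLoop (pvOcc xs) l s ↔
      i ∈ s ∧ ¬(0 ≤ i ∧ i < (xs.length : Int) ∧ xs.getD i.toNat "" ∈ l) := by
  rw [pvMem_diffLoop]
  refine and_congr Iff.rfl ?_
  constructor
  · rintro hall ⟨h0, hlt, hmem⟩
    exact hall _ hmem ((pvMem_occ' xs _ i).mpr ⟨h0, hlt, rfl⟩)
  · rintro hno f hf hocc
    obtain ⟨h0, hlt, rfl⟩ := (pvMem_occ' xs f i).mp hocc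
    exact hno ⟨h0, hlt, hf⟩

theorem pvMem_picked (all_cols : List String) (base add remove : Option (List String)) (i : Int) :
    i ∈ pvPicked all_cols base add remove ↔
      0 ≤ i ∧ i < (all_cols.length : Int) ∧
        pvSel base add remove (all_cols.getD i.toNat "") = true := by
  unfold pvPicked pvSel
  cases base <;> cases add <;> cases remove <;>
    simp only [] <;> (try split_ifs) <;>
    simp [pvMem_updateOcc, pvMem_diffOcc, PySem.Set.empty, PySem.Set.mem_ofList, PySem.List.mem_pyRange_one] <;>
    tauto

-- B's result is all_cols filtered by pvSel
theorem pvB_eq_filter (all_cols : List String) (base add remove : Option (List String)) :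
    apply_feature_diff_alt all_cols base add remove = all_cols.filter (pvSel base add remove) := by
  rw [pvAlt_eq_sorted_picked]
  have hys :
      PySem.List.sorted (pvPicked all_cols base add remove) (fun x => x) false =
        (PySem.List.pyRange 0 (all_cols.length : Int) 1).filter
          (fun i => pvSel base add remove (PySem.List.pyGetD all_cols i "")) := by
    apply PySem.List.sorted_eq_of_perm_of_pairwise_lt
    · rw [List.perm_ext_iff_of_nodup
        ((PySem.List.nodup_pyRange_one _ _).filter _) (pvNodup_picked _ _ _ _)]
      intro i
      rw [List.mem_filter, pvMem_picked, PySem.List.mem_pyRange_one]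
      constructor
      · rintro ⟨⟨h0, hlt⟩, hsel⟩
        exact ⟨h0, hlt, by rwa [PySem.List.pyGetD_of_nonneg _ _ h0] at hsel⟩
      · rintro ⟨h0, hlt, hsel⟩
        exact ⟨⟨h0, hlt⟩, by rwa [PySem.List.pyGetD_of_nonneg _ _ h0]⟩
    · exact (PySem.List.pairwise_lt_pyRange_one _ _).filter _
  rw [hys]
  conv_rhs => rw [← PySem.List.map_pyGetD_pyRange_zero' all_cols ""]
  rw [List.filter_map]
  rfl

-- ===== VERDICT (by name: the statement is the Claim_ definition above) =====
theorem apply_feature_diff_spec : Claim_equal_apply_feature_diff := by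
  intro all_cols base add remove _
  unfold Spec_apply_feature_diff
  rw [pvA_eq_filter, pvB_eq_filter]
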